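-- pv_equiv track=rewrite | github.com/MrBrantCode/unitest_baseline | mut_generate/mist_train_cf/cf_46535/solution.py | get_even_prime_and_merge
-- ===== SOURCE A (Python) =====
-- def get_even_prime_and_merge(l1: list, l2: list):
--     """
--     Return only even prime numbers from both lists, merged and sorted in descending order.
--     """
--     def is_prime(num: int):
--         """Check if the number is a prime number"""
--         if num <= 1:
--             return False
--         if num == 2:
--             return True
--         if num % 2 == 0:
--             return False
--         sqr = int(num**0.5) + 1
--         for divisor in range(3, sqr, 2):
--             if num % divisor == 0:
--                 return False
--         return True
--
--     even_prime_numbers = [num for num in l1 + l2 if num > 0 and num % 2 == 0 and is_prime(num)]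
--     return sorted(even_prime_numbers, reverse=True)
-- ===== SOURCE B (Python) =====
-- def get_even_prime_and_merge(l1: list, l2: list):
--     """
--     Return only even prime numbers from both lists, merged and sorted in descending order.
--     The only even prime is 2, so the result is one 2 per occurrence of 2 in either list.
--     """
--     return [2] * (l1.count(2) + l2.count(2))
-- ===== Notes on version B (the rewrite author's own statement) =====
-- stated objective: simpler
-- what changed: Replaced the trial-division primality filter plus descending sort by the closed-form fact that 2 is the only even prime: B returns [2] repeated count-of-2s times, with no is_prime helper, no filter pass and no sort.
import Mathlib
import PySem

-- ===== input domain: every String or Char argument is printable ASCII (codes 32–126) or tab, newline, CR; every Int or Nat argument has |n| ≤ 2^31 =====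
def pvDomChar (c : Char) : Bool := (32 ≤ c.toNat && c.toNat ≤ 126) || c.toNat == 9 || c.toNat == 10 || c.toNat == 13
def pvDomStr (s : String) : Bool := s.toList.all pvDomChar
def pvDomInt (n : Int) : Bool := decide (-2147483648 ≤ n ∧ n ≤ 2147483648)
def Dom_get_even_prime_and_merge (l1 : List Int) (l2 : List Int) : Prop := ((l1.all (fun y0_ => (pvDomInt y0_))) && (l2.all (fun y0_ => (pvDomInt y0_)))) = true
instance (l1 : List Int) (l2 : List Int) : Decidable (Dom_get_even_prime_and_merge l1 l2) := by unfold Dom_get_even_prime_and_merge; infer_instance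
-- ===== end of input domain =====

-- B replaces A's trial-division primality filter and descending sort by the closed form
-- "2 is the only even prime": replicate 2, count-of-2s times (objective: simpler).


-- ===== PORT A =====
-- is_prime helper of A.  'int(num**0.5) + 1' is ported as Nat.sqrt; this is exact for every
-- num this program reaches (the branch is only entered for odd num, and in the comprehension
-- is_prime is only called on even num, so the loop is never executed there).
def pvIsPrime (num : Int) : Bool :=
  if num ≤ 1 then false
  else if num == 2 then true
  else if PySem.Int.mod num 2 == 0 then false
  else
    let sqr : Int := (num.toNat.sqrt : Int) + 1
    -- 'for divisor in range(3, sqr, 2): if num % divisor == 0: return False' / 'return True'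
    (PySem.List.pyRange 3 sqr 2).all (fun divisor => !(PySem.Int.mod num divisor == 0))

def get_even_prime_and_merge (l1 : List Int) (l2 : List Int) : List Int :=
  PySem.List.sorted
    ((l1 ++ l2).filter (fun num => decide (num > 0) && (PySem.Int.mod num 2 == 0) && pvIsPrime num))
    (fun x => x) true

-- ===== PORT B =====
def get_even_prime_and_merge_alt (l1 : List Int) (l2 : List Int) : List Int :=
  List.replicate (l1.count 2 + l2.count 2) 2

-- ===== PRECONDITION & SPEC =====
def Spec_get_even_prime_and_merge (l1 : List Int) (l2 : List Int) (out : List Int) : Prop := out = get_even_prime_and_merge_alt l1 l2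
instance (l1 : List Int) (l2 : List Int) (out : List Int) : Decidable (Spec_get_even_prime_and_merge l1 l2 out) := by unfold Spec_get_even_prime_and_merge; infer_instance

-- ===== CLAIM (what is proved, stated in full; the proofs are below) =====
def Claim_equal_get_even_prime_and_merge : Prop := ∀ (l1 : List Int) (l2 : List Int), Dom_get_even_prime_and_merge l1 l2 → Spec_get_even_prime_and_merge l1 l2 (get_even_prime_and_merge l1 l2)

-- ===== LEMMAS AND PROOFS =====

-- A's filter test is exactly "num = 2": a positive even number is prime iff it is 2.
theorem pvFilter_eq_beq_two (num : Int) :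
    (decide (num > 0) && (PySem.Int.mod num 2 == 0) && pvIsPrime num) = (num == 2) := by
  unfold pvIsPrime
  by_cases h2 : num = 2
  · subst h2; decide
  · by_cases hpos : num > 0
    · by_cases hev : PySem.Int.mod num 2 = 0
      · -- positive even num ≠ 2: is_prime's 'num % 2 == 0' branch returns False
        have hdvd : (2 : Int) ∣ num := (PySem.Int.mod_eq_zero_iff_dvd num 2).mp hev
        simp [hdvd, h2]
      · -- odd num: the filter's own 'num % 2 == 0' test fails
        have hodd : num % 2 ≠ 0 := by
          rwa [← PySem.Int.mod_eq_emod_of_pos (by norm_num : (0:Int) < 2)]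
        have hb : (num % 2 == 0) = false := by
          simpa using hodd
        simp [hb, h2]
    · simp [hpos, h2]

-- ===== VERDICT (by name: the statement is the Claim_ definition above) =====
theorem get_even_prime_and_merge_spec : Claim_equal_get_even_prime_and_merge := by
  intro l1 l2 _
  unfold Spec_get_even_prime_and_merge get_even_prime_and_merge get_even_prime_and_merge_alt
  have hf : (l1 ++ l2).filter (fun num => decide (num > 0) && (PySem.Int.mod num 2 == 0) && pvIsPrime num)
      = (l1 ++ l2).filter (fun num => num == 2) := by
    apply List.filter_congr
    intro x _
    exact pvFilter_eq_beq_two x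
  rw [hf, List.filter_beq, List.count_append]
  exact PySem.List.sorted_rev_eq_self_of_pairwise _ _ (List.pairwise_replicate.mpr (by simp))
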